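-- pv_equiv track=rewrite | github.com/smw1988/python-practice | lc-contest/p3.py | _buildAppearanceMap
-- ===== SOURCE A (Python) =====
-- from typing import List
--
-- def _buildAppearanceMap(moles: List[List[int]]):
--     appearanceMap: dict[int, list] = {}
--     for mole in moles:
--         time = mole[0]
--         if time not in appearanceMap:
--             appearanceMap[time] = []
--         appearanceMap[time].append((mole[1], mole[2]))
--
--     return appearanceMap
-- ===== SOURCE B (Python) =====
-- from typing import List
--
-- def _buildAppearanceMap(moles: List[List[int]]):
--     # Two-pass declarative grouping: first the distinct times in first-appearance
--     # order, then one comprehension per time collecting its coordinates.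
--     times = list(dict.fromkeys(m[0] for m in moles))
--     return {t: [(m[1], m[2]) for m in moles if m[0] == t] for t in times}
-- ===== Notes on version B (the rewrite author's own statement) =====
-- stated objective: alternative
-- what changed: Replaces the single-pass dict accumulation (membership test + in-place append per mole) with a declarative two-pass form: dedup the times in first-appearance order, then build each group by a filtering comprehension over the whole input.
import Mathlib
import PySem

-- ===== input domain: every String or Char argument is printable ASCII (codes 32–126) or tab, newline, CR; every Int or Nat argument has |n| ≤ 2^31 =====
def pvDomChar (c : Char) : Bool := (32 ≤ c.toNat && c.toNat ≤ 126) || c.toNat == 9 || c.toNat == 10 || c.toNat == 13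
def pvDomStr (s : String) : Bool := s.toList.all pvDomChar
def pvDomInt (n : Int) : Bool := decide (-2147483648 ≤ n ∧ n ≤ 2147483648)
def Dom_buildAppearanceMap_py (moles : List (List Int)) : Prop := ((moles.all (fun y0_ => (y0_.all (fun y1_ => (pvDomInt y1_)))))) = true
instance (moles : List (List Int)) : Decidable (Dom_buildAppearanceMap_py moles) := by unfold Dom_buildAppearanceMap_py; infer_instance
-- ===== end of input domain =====

-- B replaces A's single-pass dict accumulation with a two-pass dedup-then-filter grouping;
-- same return value, neither version mutates its argument.

-- mole[i] for the literal indices 0, 1, 2; exact under Pre_ (3 ≤ mole.length), where Python cannot raise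
def pvAt (m : List Int) (i : Int) : Int := (PySem.List.pyGet? m i).getD 0

-- ===== PORT A =====
def buildAppearanceMap_py (moles : List (List Int)) : List (Int × List (Int × Int)) :=
  (moles.foldl
    (fun d mole =>
      let time := pvAt mole 0
      let d := if d.contains time then d else d.insert time ([] : List (Int × Int))
      d.modify time [] (fun l => l ++ [(pvAt mole 1, pvAt mole 2)]))
    PySem.Dict.empty).items

-- ===== PORT B =====
def buildAppearanceMap_py_alt (moles : List (List Int)) : List (Int × List (Int × Int)) :=
  let times := PySem.List.dedup (moles.map (fun m => pvAt m 0))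
  times.map (fun t =>
    (t, (moles.filter (fun m => pvAt m 0 == t)).map (fun m => (pvAt m 1, pvAt m 2))))

-- ===== PRECONDITION & SPEC =====
-- Pre_ excludes exactly the inputs on which the Python A raises IndexError (a mole with fewer than 3 entries).
def Pre_buildAppearanceMap_py (moles : List (List Int)) : Prop := ∀ m ∈ moles, 3 ≤ m.length
instance (moles : List (List Int)) : Decidable (Pre_buildAppearanceMap_py moles) := by unfold Pre_buildAppearanceMap_py; infer_instance
def pvWitness_buildAppearanceMap_py : List (List Int) := [[1, 2, 3], [1, 4, 5], [0, 6, 7]]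
def Spec_buildAppearanceMap_py (moles : List (List Int)) (out : List (Int × List (Int × Int))) : Prop := out = buildAppearanceMap_py_alt moles
instance (moles : List (List Int)) (out : List (Int × List (Int × Int))) : Decidable (Spec_buildAppearanceMap_py moles out) := by unfold Spec_buildAppearanceMap_py; infer_instance

-- ===== CLAIM (what is proved, stated in full; the proofs are below) =====
def Claim_equal_buildAppearanceMap_py : Prop := ∀ (moles : List (List Int)), Dom_buildAppearanceMap_py moles → Pre_buildAppearanceMap_py moles → Spec_buildAppearanceMap_py moles (buildAppearanceMap_py moles)

-- ===== LEMMAS AND PROOFS =====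

-- A's loop body (membership test, conditional insert of [], in-place append) is d[time] = d.get(time, []) + [pair]
theorem stepA_eq (d : PySem.Dict Int (List (Int × Int))) (t : Int) (p : Int × Int) :
    (if d.contains t then d else d.insert t ([] : List (Int × Int))).modify t [] (fun l => l ++ [p])
      = d.modify t [] (fun l => l ++ [p]) := by
  by_cases hc : d.contains t
  · simp [hc]
  · simp only [Bool.not_eq_true] at hc
    simp [hc, PySem.Dict.modify, PySem.Dict.insert_insert_self, PySem.Dict.getD_insert_self,
      PySem.Dict.getD_of_not_contains]

-- ===== VERDICT (by name: the statement is the Claim_ definition above) =====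
theorem buildAppearanceMap_py_spec : Claim_equal_buildAppearanceMap_py := by
  intro moles _ _
  unfold Spec_buildAppearanceMap_py buildAppearanceMap_py buildAppearanceMap_py_alt
  have hfold : (moles.foldl
      (fun d mole =>
        let time := pvAt mole 0
        let d := if d.contains time then d else d.insert time ([] : List (Int × Int))
        d.modify time [] (fun l => l ++ [(pvAt mole 1, pvAt mole 2)]))
      PySem.Dict.empty) =
      ((moles.map (fun m => (pvAt m 0, (pvAt m 1, pvAt m 2)))).foldl
        (fun d p => d.modify p.1 [] (fun l => l ++ [p.2])) PySem.Dict.empty) := by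
    rw [List.foldl_map]
    apply PySem.List.foldl_congr_mem
    intro acc m _
    exact stepA_eq acc (pvAt m 0) (pvAt m 1, pvAt m 2)
  rw [hfold]
  set l' := moles.map (fun m => (pvAt m 0, (pvAt m 1, pvAt m 2))) with hl'
  have hnd : ((l'.foldl (fun d p => d.modify p.1 [] (fun l => l ++ [p.2])) PySem.Dict.empty)).keys.Nodup :=
    PySem.Dict.nodup_keys_foldl_modify_key l' Prod.fst [] _ PySem.Dict.empty PySem.Dict.nodup_keys_empty
  rw [PySem.Dict.items_eq_map_keys _ hnd []]
  rw [PySem.Dict.keys_foldl_modify_key]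
  have hkeys : PySem.Set.update (PySem.Dict.empty : PySem.Dict Int (List (Int × Int))).keys (l'.map Prod.fst)
      = PySem.List.dedup (moles.map (fun m => pvAt m 0)) := by
    simp [PySem.Set.update_nil_left, hl', List.map_map, Function.comp_def]
  rw [hkeys]
  apply List.map_congr_left
  intro t _
  rw [PySem.Dict.getD_foldl_modify_append (l := l') (d := PySem.Dict.empty) (c := t)]
  simp [hl', List.filter_map, List.map_map, Function.comp_def]
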